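-- pv_equiv track=rewrite | github.com/laagom/Algorithm | 프로그래머스/lv0/120837. 개미 군단/개미 군단.py | solution
-- ===== SOURCE A (Python) =====
-- def solution(hp):
--     장군개미 = 5
--     병정개미 = 3
--     일개미 = 1
--
--     # 23/5 => (4, 3)  3/3 => (1, 0)
--     # 24/5 => (4, 4)  4/3 => (1, 1)  1/1 => (1, 0)
--
--     anti = 0
--
--     while(hp > 0):
--         if hp >= 장군개미:
--             anti += hp//장군개미
--             hp = hp%장군개미
--
--         elif hp >= 병정개미:
--             anti += hp//병정개미
--             hp = hp%병정개미
--
--         elif hp >= 일개미: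
--             anti += hp//일개미
--             hp = hp%일개미
--
--     return anti
-- ===== SOURCE B (Python) =====
-- def solution(hp):
--     if hp <= 0:
--         return 0
--     return hp // 5 + (hp % 5) // 3 + (hp % 5) % 3
-- ===== Notes on version B (the rewrite author's own statement) =====
-- stated objective: simpler
-- what changed: Replaced the greedy while-loop over denominations 5/3/1 with the closed-form expression hp//5 + (hp%5)//3 + (hp%5)%3 guarded by hp <= 0.
import Mathlib
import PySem

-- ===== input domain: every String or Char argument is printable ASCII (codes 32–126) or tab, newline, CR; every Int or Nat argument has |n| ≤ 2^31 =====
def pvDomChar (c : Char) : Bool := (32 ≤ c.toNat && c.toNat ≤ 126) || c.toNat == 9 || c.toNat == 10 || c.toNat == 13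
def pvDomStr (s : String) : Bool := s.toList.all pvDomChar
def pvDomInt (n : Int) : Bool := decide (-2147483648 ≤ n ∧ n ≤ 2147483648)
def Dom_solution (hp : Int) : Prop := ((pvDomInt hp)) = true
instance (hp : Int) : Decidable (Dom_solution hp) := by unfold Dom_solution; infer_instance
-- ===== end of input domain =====

-- ===== PORT A =====
-- B replaces A's greedy while-loop with a closed-form expression (objective: simpler).
-- Port of A's while loop: state (hp, anti); the final elif's else (0 < hp < 1) is
-- unreachable over Int, so termination is proved from the contradiction there.
def solutionLoop (hp anti : Int) : Int :=
  if h0 : hp > 0 then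
    if h5 : hp ≥ 5 then
      solutionLoop (PySem.Int.mod hp 5) (anti + PySem.Int.floordiv hp 5)
    else if h3 : hp ≥ 3 then
      solutionLoop (PySem.Int.mod hp 3) (anti + PySem.Int.floordiv hp 3)
    else if h1 : hp ≥ 1 then
      solutionLoop (PySem.Int.mod hp 1) (anti + PySem.Int.floordiv hp 1)
    else
      solutionLoop hp anti   -- unreachable: 0 < hp < 1 has no Int solution
  else anti
termination_by hp.toNat
decreasing_by
  · have := PySem.Int.mod_lt hp (b := 5) (by norm_num)
    have := PySem.Int.mod_nonneg hp (b := 5) (by norm_num)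
    omega
  · have := PySem.Int.mod_lt hp (b := 3) (by norm_num)
    have := PySem.Int.mod_nonneg hp (b := 3) (by norm_num)
    omega
  · have := PySem.Int.mod_lt hp (b := 1) (by norm_num)
    have := PySem.Int.mod_nonneg hp (b := 1) (by norm_num)
    omega
  · omega

def solution (hp : Int) : Int := solutionLoop hp 0

-- ===== PORT B =====
def solution_alt (hp : Int) : Int :=
  if hp ≤ 0 then 0
  else PySem.Int.floordiv hp 5 + PySem.Int.floordiv (PySem.Int.mod hp 5) 3
       + PySem.Int.mod (PySem.Int.mod hp 5) 3

-- ===== PRECONDITION & SPEC =====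
def Spec_solution (hp : Int) (out : Int) : Prop := out = solution_alt hp
instance (hp : Int) (out : Int) : Decidable (Spec_solution hp out) := by unfold Spec_solution; infer_instance

-- ===== CLAIM (what is proved, stated in full; the proofs are below) =====
def Claim_equal_solution : Prop := ∀ (hp : Int), Dom_solution hp → Spec_solution hp (solution hp)

-- ===== LEMMAS AND PROOFS =====

-- ===== VERDICT (by name: the statement is the Claim_ definition above) =====
-- residual of the loop once hp has dropped below 5
theorem solutionLoop_small (r a : Int) (h0 : 0 ≤ r) (h5 : r < 5) :
    solutionLoop r a = a + PySem.Int.floordiv r 3 + PySem.Int.mod r 3 := by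
  interval_cases r <;>
    simp [solutionLoop, PySem.Int.floordiv, PySem.Int.mod]

theorem solution_spec : Claim_equal_solution := by
  intro hp _
  unfold Spec_solution solution solution_alt
  by_cases hpos : hp > 0
  · rw [if_neg (by omega)]
    by_cases h5 : hp ≥ 5
    · rw [solutionLoop, dif_pos hpos, dif_pos h5,
        solutionLoop_small _ _ (PySem.Int.mod_nonneg hp (by norm_num))
          (PySem.Int.mod_lt hp (by norm_num))]
      ring
    · rw [solutionLoop_small _ _ (by omega) (by omega)]
      have h55 : PySem.Int.mod hp 5 = hp := by
        rw [PySem.Int.mod_eq_emod_of_pos (by norm_num)]; omega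
      have h05 : PySem.Int.floordiv hp 5 = 0 := by
        rw [PySem.Int.floordiv_eq_ediv_of_pos (by norm_num)]; omega
      rw [h55, h05]
  · rw [solutionLoop, dif_neg hpos, if_pos (by omega)]
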